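-- pv_equiv track=rewrite | github.com/NadezhdaDonetskaia/dive_into_Python | lesson3/lesson3.py | find_items_common_except_one
-- ===== SOURCE A (Python) =====
-- def get_all_items(friends_items: dict) -> set:
--     return set.union(*friends_items.values())
--
-- def find_items_common_except_one(friends_items: dict) -> tuple[set, str]:
--     res_items = get_all_items(friends_items)
--     res_name = ''
--     for item in res_items.copy():
--         count = 0
--         name = ''
--         for friend, items in friends_items.items():
--             if item in items:
--                 count += 1
--             else:
--                 name = friend
--         if count == len(friends_items) - 1:
--             res_name = name
--         else:
--             res_items.remove(item)
--     return res_items, res_name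
-- ===== SOURCE B (Python) =====
-- def find_items_common_except_one(friends_items):
--     n = len(friends_items)
--     counts = {}
--     for items in friends_items.values():
--         for item in items:
--             counts[item] = counts.get(item, 0) + 1
--     res_items = set()
--     pick = None
--     for item, c in counts.items():
--         if c == n - 1:
--             res_items.add(item)
--             pick = item
--     res_name = ''
--     if pick is not None:
--         for friend, items in friends_items.items():
--             if pick not in items:
--                 res_name = friend
--     return res_items, res_name
-- ===== Notes on version B (the rewrite author's own statement) =====
-- stated objective: faster
-- what changed: Replaces A's per-item rescan of all friends (for every item of the union, an inner loop over the whole dict) by one counting pass over all item occurrences into a dict, a filter of that dict by count == n-1, and one final scan naming the missing friend of the last qualifying item; Pre_ excludes the empty dict (A raises), value lists with duplicate elements (not an encoding of the Python set values), and inputs whose qualifying items are missed by two different friends, where A's res_name depends on the accidental hash order of set iteration.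
-- outside the precondition, e.g. on find_items_common_except_one({'a': {'x'}, 'b': {'y'}}): A returns ({'y', 'x'}, 'b'), B returns ({'y', 'x'}, 'a')
-- crash fix: On the empty dict A raises TypeError (set.union with no arguments); B returns (set(), ''). — e.g. on find_items_common_except_one([]): A raises TypeError, B returns ([], "")
import Mathlib
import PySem

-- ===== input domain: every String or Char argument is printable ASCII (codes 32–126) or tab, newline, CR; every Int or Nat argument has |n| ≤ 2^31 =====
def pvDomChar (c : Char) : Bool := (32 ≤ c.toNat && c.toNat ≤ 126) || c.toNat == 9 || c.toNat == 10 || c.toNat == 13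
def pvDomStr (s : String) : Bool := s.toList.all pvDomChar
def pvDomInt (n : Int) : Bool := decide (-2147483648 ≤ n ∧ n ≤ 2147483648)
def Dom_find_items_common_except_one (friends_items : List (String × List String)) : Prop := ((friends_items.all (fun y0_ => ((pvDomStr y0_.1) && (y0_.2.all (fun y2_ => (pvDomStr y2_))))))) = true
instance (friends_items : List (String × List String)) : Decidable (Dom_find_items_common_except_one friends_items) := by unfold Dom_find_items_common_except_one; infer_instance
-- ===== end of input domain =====

-- B replaces A's per-item rescan of every friend by one counting pass over all item
-- occurrences plus a single final scan for the missing friend (objective: faster).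


-- ===== PORT A =====
-- literal port of A; the input dict[str, set[str]] arrives as an association list
-- (duplicate keys overwrite in place, as dict() does) with each value list holding the
-- set's distinct elements.  set.union(*values) is the union in first-occurrence order;
-- res_items.remove(item) is Set.discard (the item is always present, so no KeyError).
def find_items_common_except_one (friends_items : List (String × List String)) : List String × String :=
  let d := PySem.Dict.ofList friends_items
  let res_items := PySem.Set.ofList d.values.flatten
  res_items.foldl (fun (st : PySem.Set String × String) item =>
      let cn := d.items.foldl (fun (cn : Int × String) p =>
          if p.2.contains item then (cn.1 + 1, cn.2) else (cn.1, p.1)) (0, "")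
      if cn.1 = (d.size : Int) - 1 then (st.1, cn.2)
      else (PySem.Set.discard st.1 item, st.2))
    (res_items, "")

-- ===== PORT B =====
def find_items_common_except_one_alt (friends_items : List (String × List String)) : List String × String :=
  let d := PySem.Dict.ofList friends_items
  let n : Int := (d.size : Int)
  let counts := d.values.foldl (fun c items =>
      items.foldl (fun (c : PySem.Dict String Int) item => c.modify item 0 (· + 1)) c)
    PySem.Dict.empty
  let rp := counts.items.foldl (fun (st : PySem.Set String × Option String) kv =>
      if kv.2 = n - 1 then (PySem.Set.add st.1 kv.1, some kv.1) else st)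
    (PySem.Set.empty, none)
  let res_name := match rp.2 with
    | none => ""
    | some pick => d.items.foldl (fun nm p => if p.2.contains pick then nm else p.1) ""
  (rp.1, res_name)

-- ===== PRECONDITION & SPEC =====
-- the friends (after dict collapse of duplicate keys) that do NOT own item x, in dict order
def pvMissers (d : PySem.Dict String (List String)) (x : String) : List String :=
  (d.items.filter (fun p => !(p.2.contains x))).map (·.1)

-- Pre_ excludes: the empty dict (A raises TypeError); value lists with duplicates (the
-- Python values are sets, a duplicated element is not a set encoding); and inputs whose
-- qualifying items are missed by two different friends, where A's res_name depends on the
-- accidental hash-iteration order of the union set.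
def Pre_find_items_common_except_one (friends_items : List (String × List String)) : Prop :=
  friends_items ≠ [] ∧ (∀ p ∈ friends_items, p.2.Nodup) ∧
  (let d := PySem.Dict.ofList friends_items
   ∀ x ∈ d.values.flatten, ∀ y ∈ d.values.flatten,
     (pvMissers d x).length = 1 → (pvMissers d y).length = 1 → pvMissers d x = pvMissers d y)
instance (friends_items : List (String × List String)) : Decidable (Pre_find_items_common_except_one friends_items) := by unfold Pre_find_items_common_except_one; infer_instance

def pvWitness_find_items_common_except_one : (List (String × List String)) :=
  [("alice", ["book", "pen"]), ("bob", ["book"])]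

-- On the empty dict A raises TypeError (set.union with no arguments); B returns (set(), '').
def Raises_find_items_common_except_one (friends_items : List (String × List String)) : Prop :=
  friends_items = []
instance (friends_items : List (String × List String)) : Decidable (Raises_find_items_common_except_one friends_items) := by unfold Raises_find_items_common_except_one; infer_instance
def pvRaiseWitness_find_items_common_except_one : (List (String × List String)) := []
def pvRaiseWitnessOut_find_items_common_except_one : List String × String := ([], "")

def Spec_find_items_common_except_one (friends_items : List (String × List String)) (out : List String × String) : Prop := out = find_items_common_except_one_alt friends_items
instance (friends_items : List (String × List String)) (out : List String × String) : Decidable (Spec_find_items_common_except_one friends_items out) := by unfold Spec_find_items_common_except_one; infer_instance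

-- ===== CLAIM (what is proved, stated in full; the proofs are below) =====
def Claim_equal_find_items_common_except_one : Prop := ∀ (friends_items : List (String × List String)), Dom_find_items_common_except_one friends_items → Pre_find_items_common_except_one friends_items → Spec_find_items_common_except_one friends_items (find_items_common_except_one friends_items)
def Claim_raises_find_items_common_except_one : Prop := (∀ (friends_items : List (String × List String)), Dom_find_items_common_except_one friends_items → Raises_find_items_common_except_one friends_items → ¬ Pre_find_items_common_except_one friends_items) ∧ (Dom_find_items_common_except_one (pvRaiseWitness_find_items_common_except_one) ∧ Raises_find_items_common_except_one (pvRaiseWitness_find_items_common_except_one) ∧ find_items_common_except_one_alt (pvRaiseWitness_find_items_common_except_one) = pvRaiseWitnessOut_find_items_common_except_one)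

-- ===== LEMMAS AND PROOFS =====

-- number of friends owning x, and A's inner-loop "name" (last friend not owning x)
def pvCnt (L : List (String × List String)) (x : String) : Nat :=
  L.countP (fun p => p.2.contains x)
def pvScanName (L : List (String × List String)) (x : String) : String :=
  L.foldl (fun nm p => if p.2.contains x then nm else p.1) ""

theorem pv_foldl_pair {α β γ : Type} (l : List α) (f : β → α → β) (g : γ → α → γ) (b : β) (c : γ) :
    l.foldl (fun p x => (f p.1 x, g p.2 x)) (b, c) = (l.foldl f b, l.foldl g c) := by
  induction l generalizing b c with
  | nil => rfl
  | cons h t ih => simpa using ih (f b h) (g c h)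

theorem pv_innerA (L : List (String × List String)) (x : String) (c : Int) (nm : String) :
    L.foldl (fun (cn : Int × String) p =>
        if p.2.contains x then (cn.1 + 1, cn.2) else (cn.1, p.1)) (c, nm)
    = (c + (pvCnt L x : Int), L.foldl (fun nm p => if p.2.contains x then nm else p.1) nm) := by
  induction L generalizing c nm with
  | nil => simp [pvCnt]
  | cons h t ih =>
    rw [List.foldl_cons, List.foldl_cons]
    by_cases hc : h.2.contains x
    · rw [if_pos hc, if_pos hc, ih]
      have hm : x ∈ h.2 := by simpa using hc
      have hcnt : pvCnt (h :: t) x = pvCnt t x + 1 := by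
        simp [pvCnt, hm]
      rw [hcnt, Prod.mk.injEq]
      exact ⟨by push_cast; ring, rfl⟩
    · rw [if_neg hc, if_neg hc, ih]
      have hm : x ∉ h.2 := by simpa using hc
      have hcnt : pvCnt (h :: t) x = pvCnt t x := by
        simp [pvCnt, hm]
      rw [hcnt]

theorem pv_foldl_discard (q : String → Bool) (l : List String) (acc : List String) :
    l.foldl (fun a x => if q x then a else PySem.Set.discard a x) acc
    = acc.filter (fun y => q y || !(l.contains y)) := by
  induction l generalizing acc with
  | nil => simp
  | cons h t ih =>
    by_cases hq : q h
    · rw [List.foldl_cons, if_pos hq, ih]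
      refine List.filter_congr (fun y _ => ?_)
      by_cases hyh : y = h
      · subst hyh; simp [hq]
      · simp [hyh]
    · rw [List.foldl_cons, if_neg hq, ih]
      simp only [PySem.Set.discard, List.filter_filter]
      refine List.filter_congr (fun y _ => ?_)
      by_cases hyh : y = h
      · subst hyh; simp [hq]
      · simp [hyh]

theorem pv_foldl_add (q : String → Bool) (l : List String) (acc : List String)
    (hnd : l.Nodup) (hdisj : ∀ x ∈ l, x ∉ acc) :
    l.foldl (fun a x => if q x then PySem.Set.add a x else a) acc = acc ++ l.filter q := by
  induction l generalizing acc with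
  | nil => simp
  | cons h t ih =>
    obtain ⟨hht, hndt⟩ := List.nodup_cons.mp hnd
    by_cases hq : q h
    · rw [List.foldl_cons, if_pos hq]
      have hadd : PySem.Set.add acc h = acc ++ [h] := by
        simp [PySem.Set.add, hdisj h (by simp)]
      rw [hadd, ih (acc ++ [h]) hndt (fun x hx => by
        simp only [List.mem_append, List.mem_singleton, not_or]
        exact ⟨hdisj x (List.mem_cons_of_mem _ hx), fun hxh => hht (hxh ▸ hx)⟩)]
      simp [hq, List.append_assoc]
    · rw [List.foldl_cons, if_neg hq,
        ih acc hndt (fun x hx => hdisj x (List.mem_cons_of_mem _ hx))]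
      simp [hq]

theorem pv_foldl_name_pick (q : String → Bool) (f : String → String) (l : List String)
    (pk : Option String) (c : String) :
    l.foldl (fun nm x => if q x then f x else nm)
        (match pk with | none => c | some y => f y)
    = (match l.foldl (fun (p : Option String) x => if q x then some x else p) pk with
       | none => c | some y => f y) := by
  induction l generalizing pk with
  | nil => rfl
  | cons h t ih =>
    by_cases hq : q h
    · rw [List.foldl_cons, if_pos hq, List.foldl_cons, if_pos hq]
      simpa using ih (some h)
    · rw [List.foldl_cons, if_neg hq, List.foldl_cons, if_neg hq]
      exact ih pk

theorem pv_count_flatten (vs : List (List String)) (x : String) (h : ∀ v ∈ vs, v.Nodup) :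
    vs.flatten.count x = vs.countP (fun v => v.contains x) := by
  induction vs with
  | nil => simp
  | cons v t ih =>
    rw [List.flatten_cons, List.count_append, List.countP_cons,
      ih (fun w hw => h w (List.mem_cons_of_mem _ hw))]
    by_cases hm : x ∈ v
    · have h1 : v.count x = 1 :=
        Nat.le_antisymm (List.nodup_iff_count_le_one.mp (h v (by simp)) x) (List.count_pos_iff.mpr hm)
      simp [h1, hm, Nat.add_comm]
    · simp [List.count_eq_zero.mpr hm, hm]

theorem pv_values_nodup (l : List (String × List String)) (d : PySem.Dict String (List String))
    (hd : ∀ p ∈ d.items, p.2.Nodup) (hl : ∀ p ∈ l, p.2.Nodup) :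
    ∀ p ∈ (d.update l).items, p.2.Nodup := by
  induction l generalizing d with
  | nil => exact hd
  | cons h t ih =>
    refine ih (d.insert h.1 h.2) ?_ (fun p hp => hl p (List.mem_cons_of_mem _ hp))
    intro p hp
    simp only [PySem.Dict.insert] at hp
    split at hp
    · simp only [List.mem_map] at hp
      obtain ⟨q, hq, hpe⟩ := hp
      by_cases hk : (q.1 == h.1) = true
      · rw [if_pos hk] at hpe; exact hpe ▸ hl h (by simp)
      · rw [if_neg hk] at hpe; exact hpe ▸ hd q hq
    · simp only [List.mem_append, List.mem_singleton] at hp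
      rcases hp with hp | hp
      · exact hd p hp
      · exact hp ▸ hl h (by simp)

-- ===== VERDICT (by name: the statement is the Claim_ definition above) =====
theorem find_items_common_except_one_spec : Claim_equal_find_items_common_except_one := by
  intro fi _ hpre
  unfold Spec_find_items_common_except_one
  obtain ⟨-, hnd, -⟩ := hpre
  unfold find_items_common_except_one find_items_common_except_one_alt
  simp only []
  set d := PySem.Dict.ofList fi with hdd
  set L := d.items with hL
  set flat := d.values.flatten with hflat
  set S := PySem.Set.ofList flat with hS
  have hvals : ∀ p ∈ L, p.2.Nodup := by
    refine pv_values_nodup fi PySem.Dict.empty ?_ hnd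
    intro p hp; simp [PySem.Dict.empty] at hp
  have hSnd : S.Nodup := PySem.Set.nodup_ofList flat
  set q : String → Bool := fun x => decide ((pvCnt L x : Int) = (d.size : Int) - 1) with hq
  have hqt : ∀ x, q x = true ↔ (pvCnt L x : Int) = (d.size : Int) - 1 := by
    intro x; rw [hq]; exact decide_eq_true_iff
  have hcount : ∀ x, (flat.count x : Int) = (pvCnt L x : Int) := by
    intro x
    rw [hflat, pv_count_flatten _ x (by
      intro v hv
      simp only [List.mem_map, PySem.Dict.values] at hv
      obtain ⟨p, hp, hpe⟩ := hv
      exact hpe ▸ hvals p hp)]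
    unfold pvCnt
    rw [show d.values = L.map (·.2) from rfl, List.countP_map]
    rfl
  -- A side: split the loop into its two components
  have hA : S.foldl (fun (st : PySem.Set String × String) item =>
      let cn := L.foldl (fun (cn : Int × String) p =>
          if p.2.contains item then (cn.1 + 1, cn.2) else (cn.1, p.1)) (0, "")
      if cn.1 = (d.size : Int) - 1 then (st.1, cn.2)
      else (PySem.Set.discard st.1 item, st.2)) (S, "")
      = (S.foldl (fun a x => if q x then a else PySem.Set.discard a x) S,
         S.foldl (fun nm x => if q x then pvScanName L x else nm) "") := by
    rw [← pv_foldl_pair]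
    refine PySem.List.foldl_congr_mem S _ _ (S, "") (fun acc x _ => ?_)
    show (if (L.foldl (fun (cn : Int × String) p =>
          if p.2.contains x then (cn.1 + 1, cn.2) else (cn.1, p.1)) (0, "")).1
            = (d.size : Int) - 1
          then (acc.1, (L.foldl (fun (cn : Int × String) p =>
          if p.2.contains x then (cn.1 + 1, cn.2) else (cn.1, p.1)) (0, "")).2)
          else (PySem.Set.discard acc.1 x, acc.2)) = _
    rw [pv_innerA]
    simp only [zero_add]
    by_cases hC : (pvCnt L x : Int) = (d.size : Int) - 1
    · rw [if_pos hC, if_pos ((hqt x).mpr hC), if_pos ((hqt x).mpr hC)]; rfl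
    · rw [if_neg hC, if_neg (fun h => hC ((hqt x).mp h)),
        if_neg (fun h => hC ((hqt x).mp h))]
  -- B side: the counting pass is Counter(flat); split the filter loop likewise
  have hcounter : (d.values.foldl (fun c items =>
        items.foldl (fun (c : PySem.Dict String Int) item => c.modify item 0 (· + 1)) c)
        PySem.Dict.empty) = PySem.Dict.counter flat := by
    simp only [PySem.Dict.counter, hflat, List.foldl_flatten]
  have hB : (PySem.Dict.counter flat).items.foldl
        (fun (st : PySem.Set String × Option String) kv =>
          if kv.2 = (d.size : Int) - 1 then (PySem.Set.add st.1 kv.1, some kv.1) else st)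
        (PySem.Set.empty, none)
      = (S.foldl (fun a x => if q x then PySem.Set.add a x else a) PySem.Set.empty,
         S.foldl (fun (p : Option String) x => if q x then some x else p) none) := by
    rw [PySem.Dict.items_counter, List.foldl_map, ← pv_foldl_pair, ← hS]
    refine PySem.List.foldl_congr_mem S _ _ (PySem.Set.empty, none) (fun acc x _ => ?_)
    show (if (flat.count x : Int) = (d.size : Int) - 1
          then (PySem.Set.add acc.1 x, some x) else acc) = _
    rw [hcount x]
    by_cases hC : (pvCnt L x : Int) = (d.size : Int) - 1
    · rw [if_pos hC, if_pos ((hqt x).mpr hC), if_pos ((hqt x).mpr hC)]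
    · rw [if_neg hC, if_neg (fun h => hC ((hqt x).mp h)),
        if_neg (fun h => hC ((hqt x).mp h))]
  rw [hA, hcounter, hB]
  -- both components are now folds over S of the same qualifying predicate
  refine Prod.ext ?_ ?_
  · show S.foldl (fun a x => if q x then a else PySem.Set.discard a x) S
        = S.foldl (fun a x => if q x then PySem.Set.add a x else a) PySem.Set.empty
    rw [pv_foldl_discard, pv_foldl_add q S PySem.Set.empty hSnd (fun x _ => List.not_mem_nil)]
    simp only [PySem.Set.empty, List.nil_append]
    refine List.filter_congr (fun y hy => ?_)
    simp [List.contains_iff_mem, hy]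
  · show S.foldl (fun nm x => if q x then pvScanName L x else nm) ""
        = (match S.foldl (fun (p : Option String) x => if q x then some x else p) none with
           | none => ""
           | some pick => L.foldl (fun nm p => if p.2.contains pick then nm else p.1) "")
    exact pv_foldl_name_pick q (pvScanName L) S none ""

theorem find_items_common_except_one_raises : Claim_raises_find_items_common_except_one := by
  unfold Claim_raises_find_items_common_except_one
  constructor
  · intro fi _ hr hp
    exact hp.1 hr
  · exact ⟨by decide, rfl, by decide⟩

-- self-check consuming the raises verdict: B's port really returns ([], "") at the witness
theorem pv_raises_witness : find_items_common_except_one_alt pvRaiseWitness_find_items_common_except_one = pvRaiseWitnessOut_find_items_common_except_one := by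
  have h := find_items_common_except_one_raises
  unfold Claim_raises_find_items_common_except_one at h
  exact h.2.2.2
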